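-- pv_equiv track=rewrite | github.com/SecMeant/repsms | ProjectSMS/SMS/smsMain/funkcjeopty.py | dejnumer
-- ===== SOURCE A (Python) =====
-- def dejnumer(ileuczniow,max_i=36):
-- 	klasy=0
-- 	maxvar=max_i
-- 	temp=ileuczniow
--
-- 	klasy=0
-- 	while(temp>0):
-- 		temp-=maxvar
-- 		klasy+=1
--
-- 	odpowiedz = [0] * 3
-- 	if(temp == 0):
-- 		odpowiedz[0]=maxvar
-- 		odpowiedz[1]=temp
-- 		odpowiedz[2]=klasy
-- 		return odpowiedz
--
-- 	if(temp<0):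
-- 		temp+=maxvar
--
-- 	while(temp<maxvar):
-- 		temp+=klasy-1
-- 		maxvar-=1
--
-- 	odpowiedz[0]=maxvar
-- 	odpowiedz[1]=temp
-- 	odpowiedz[2]=klasy
-- 	return odpowiedz
-- ===== SOURCE B (Python) =====
-- def dejnumer(ileuczniow, max_i=36):
--     if ileuczniow <= 0:
--         return [max_i, ileuczniow, 0]
--     k, r = divmod(ileuczniow, max_i)
--     if r == 0:
--         return [max_i, 0, k]
--     k += 1
--     t = -((r - max_i) // k)  # = ceil((max_i - r) / k), number of iterations of A's second loop
--     return [max_i - t, r + t * (k - 1), k]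
-- ===== Notes on version B (the rewrite author's own statement) =====
-- stated objective: faster
-- what changed: Both of A's while loops (the repeated-subtraction class count and the decrement loop) are replaced by closed-form divmod/ceiling arithmetic; B is a constant number of integer operations.
import Mathlib
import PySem

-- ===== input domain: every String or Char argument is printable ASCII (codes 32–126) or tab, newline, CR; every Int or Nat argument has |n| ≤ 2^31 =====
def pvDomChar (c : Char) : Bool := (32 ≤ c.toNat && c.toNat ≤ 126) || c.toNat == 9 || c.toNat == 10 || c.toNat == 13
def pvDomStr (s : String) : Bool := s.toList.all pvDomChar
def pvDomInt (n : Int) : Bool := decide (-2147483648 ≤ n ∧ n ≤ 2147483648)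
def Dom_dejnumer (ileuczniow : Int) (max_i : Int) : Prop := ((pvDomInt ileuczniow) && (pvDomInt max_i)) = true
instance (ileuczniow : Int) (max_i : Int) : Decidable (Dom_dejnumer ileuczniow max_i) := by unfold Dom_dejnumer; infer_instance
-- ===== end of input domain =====

-- B replaces A's O(ileuczniow/max_i) counting loop and the second subtraction loop with
-- closed-form divmod/ceiling arithmetic (objective: faster, asymptotic).

-- ===== PORT A =====
-- first while loop: while temp > 0: temp -= maxvar; klasy += 1
-- (fuel only makes the recursion total; under Pre_ it is never exhausted)
def dejnumerLoop1 : Nat → Int → Int → Int → Int × Int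
  | 0, temp, klasy, _ => (temp, klasy)
  | f + 1, temp, klasy, maxvar =>
    if temp > 0 then dejnumerLoop1 f (temp - maxvar) (klasy + 1) maxvar
    else (temp, klasy)

-- second while loop: while temp < maxvar: temp += klasy - 1; maxvar -= 1
def dejnumerLoop2 : Nat → Int → Int → Int → Int × Int
  | 0, temp, maxvar, _ => (temp, maxvar)
  | f + 1, temp, maxvar, klasy =>
    if temp < maxvar then dejnumerLoop2 f (temp + (klasy - 1)) (maxvar - 1) klasy
    else (temp, maxvar)

def dejnumer (ileuczniow : Int) (max_i : Int) : List Int :=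
  let p := dejnumerLoop1 (ileuczniow.toNat + 1) ileuczniow 0 max_i
  let temp := p.1
  let klasy := p.2
  if temp = 0 then [max_i, temp, klasy]
  else
    let temp2 := if temp < 0 then temp + max_i else temp
    let q := dejnumerLoop2 (max_i - temp2).toNat temp2 max_i klasy
    [q.2, q.1, klasy]

-- ===== PORT B =====
def dejnumer_alt (ileuczniow : Int) (max_i : Int) : List Int :=
  if ileuczniow ≤ 0 then [max_i, ileuczniow, 0]
  else
    let k := PySem.Int.floordiv ileuczniow max_i
    let r := PySem.Int.mod ileuczniow max_i
    if r = 0 then [max_i, 0, k]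
    else
      let k1 := k + 1
      let t := -(PySem.Int.floordiv (r - max_i) k1)
      [max_i - t, r + t * (k1 - 1), k1]

-- ===== PRECONDITION & SPEC =====
-- Pre_ excludes exactly the inputs on which A's while loops never terminate:
-- negative ileuczniow, and positive ileuczniow with non-positive max_i.
def Pre_dejnumer (ileuczniow : Int) (max_i : Int) : Prop :=
  0 ≤ ileuczniow ∧ (ileuczniow = 0 ∨ 0 < max_i)
instance (ileuczniow : Int) (max_i : Int) : Decidable (Pre_dejnumer ileuczniow max_i) := by
  unfold Pre_dejnumer; infer_instance

def pvWitness_dejnumer : Int × Int := (37, 36)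

def Spec_dejnumer (ileuczniow : Int) (max_i : Int) (out : List Int) : Prop := out = dejnumer_alt ileuczniow max_i
instance (ileuczniow : Int) (max_i : Int) (out : List Int) : Decidable (Spec_dejnumer ileuczniow max_i out) := by unfold Spec_dejnumer; infer_instance

-- ===== CLAIM (what is proved, stated in full; the proofs are below) =====
def Claim_equal_dejnumer : Prop := ∀ (ileuczniow : Int) (max_i : Int), Dom_dejnumer ileuczniow max_i → Pre_dejnumer ileuczniow max_i → Spec_dejnumer ileuczniow max_i (dejnumer ileuczniow max_i)

-- ===== LEMMAS AND PROOFS =====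

-- Running A's first loop for exactly c iterations, given the bracket (c-1)*m < temp ≤ c*m.
theorem dejnumerLoop1_run (c : Nat) : ∀ (f : Nat) (temp klasy m : Int), 0 < m → c ≤ f →
    ((c : Int) - 1) * m < temp → temp ≤ (c : Int) * m →
    dejnumerLoop1 f temp klasy m = (temp - (c : Int) * m, klasy + (c : Int)) := by
  induction c with
  | zero =>
    intro f temp klasy m hm _ _ h2
    have ht : ¬ temp > 0 := by simp at h2; omega
    cases f <;> simp [dejnumerLoop1, ht]
  | succ c ih =>
    intro f temp klasy m hm hf h1 h2
    have hc0 : (0 : Int) ≤ (c : Int) * m := by positivity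
    have ht : temp > 0 := by push_cast at h1; nlinarith
    obtain ⟨f', rfl⟩ : ∃ f', f = f' + 1 := ⟨f - 1, by omega⟩
    have h1' : ((c : Int) - 1) * m < temp - m := by push_cast at h1 ⊢; nlinarith
    have h2' : temp - m ≤ (c : Int) * m := by push_cast at h2 ⊢; nlinarith
    rw [dejnumerLoop1, if_pos ht, ih f' (temp - m) (klasy + 1) m hm (by omega) h1' h2']
    simp only [Prod.mk.injEq]
    constructor <;> push_cast <;> ring

-- Running A's second loop for exactly c iterations, given the bracket on the gap maxvar - temp.
theorem dejnumerLoop2_run (c : Nat) : ∀ (f : Nat) (temp maxvar k : Int), 0 < k → c ≤ f →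
    ((c : Int) - 1) * k < maxvar - temp → maxvar - temp ≤ (c : Int) * k →
    dejnumerLoop2 f temp maxvar k = (temp + (c : Int) * (k - 1), maxvar - (c : Int)) := by
  induction c with
  | zero =>
    intro f temp maxvar k hk _ _ h2
    have ht : ¬ temp < maxvar := by simp at h2; omega
    cases f <;> simp [dejnumerLoop2, ht]
  | succ c ih =>
    intro f temp maxvar k hk hf h1 h2
    have hc0 : (0 : Int) ≤ (c : Int) * k := by positivity
    have ht : temp < maxvar := by push_cast at h1; nlinarith
    obtain ⟨f', rfl⟩ : ∃ f', f = f' + 1 := ⟨f - 1, by omega⟩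
    have h1' : ((c : Int) - 1) * k < (maxvar - 1) - (temp + (k - 1)) := by push_cast at h1 ⊢; nlinarith
    have h2' : (maxvar - 1) - (temp + (k - 1)) ≤ (c : Int) * k := by push_cast at h2 ⊢; nlinarith
    rw [dejnumerLoop2, if_pos ht, ih f' (temp + (k - 1)) (maxvar - 1) k hk (by omega) h1' h2']
    simp only [Prod.mk.injEq]
    constructor <;> push_cast <;> ring

-- ===== VERDICT (by name: the statement is the Claim_ definition above) =====
theorem dejnumer_spec : Claim_equal_dejnumer := by
  intro n m _ hpre
  obtain ⟨hn0, hcase⟩ := hpre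
  unfold Spec_dejnumer
  rcases eq_or_lt_of_le hn0 with hz | hpos
  · -- n = 0
    subst hz
    simp [dejnumer, dejnumerLoop1, dejnumer_alt]
  · -- n > 0, hence 0 < m
    have hm : 0 < m := by omega
    set k := PySem.Int.floordiv n m with hk
    set r := PySem.Int.mod n m with hr
    have hkm : k * m + r = n := PySem.Int.floordiv_mul_add_mod n m
    have hre : r = n % m := by rw [hr, PySem.Int.mod_eq_emod_of_pos hm]
    have hr0 : 0 ≤ r := by rw [hre]; exact Int.emod_nonneg n (by omega)
    have hrm : r < m := by rw [hre]; exact Int.emod_lt_of_pos n hm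
    have hk0 : 0 ≤ k := by nlinarith
    have hkn : k ≤ n := by nlinarith
    by_cases hrz : r = 0
    · -- m divides n: first loop runs exactly k times and leaves temp = 0
      have hk1 : 1 ≤ k := by nlinarith
      have hcast : ((k.toNat : Int)) = k := Int.toNat_of_nonneg hk0
      have hrun := dejnumerLoop1_run k.toNat (n.toNat + 1) n 0 m hm (by omega) (by rw [hcast]; nlinarith) (by rw [hcast]; nlinarith)
      rw [hcast] at hrun
      simp only [dejnumer, hrun]
      have : n - k * m = 0 := by omega
      rw [this]
      simp [dejnumer_alt, ← hk, ← hr, hrz, not_le.mpr hpos]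
    · -- r ≠ 0: first loop runs k+1 times, temp = r - m < 0, then second loop
      have hrpos : 0 < r := lt_of_le_of_ne hr0 (Ne.symm hrz)
      have hcast : ((k + 1).toNat : Int) = k + 1 := Int.toNat_of_nonneg (by omega)
      have hrun := dejnumerLoop1_run (k + 1).toNat (n.toNat + 1) n 0 m hm (by omega) (by rw [hcast]; nlinarith) (by rw [hcast]; nlinarith)
      rw [hcast] at hrun
      simp only [dejnumer, hrun]
      have htemp : n - (k + 1) * m = r - m := by ring_nf; omega
      rw [htemp]
      have hne : ¬ (r - m = 0) := by omega
      have hlt : r - m < 0 := by omega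
      -- the ceiling count t of the second loop
      set t := -(PySem.Int.floordiv (r - m) (k + 1)) with hT
      have hbr : (t - 1) * (k + 1) < m - r ∧ m - r ≤ t * (k + 1) := by
        have : -(PySem.Int.floordiv (-(m - r)) (k + 1)) = t := by rw [hT]; ring_nf
        exact (PySem.Int.neg_floordiv_neg_eq_iff_of_pos (by omega)).mp this
      obtain ⟨hbr1, hbr2⟩ := hbr
      have ht1 : 1 ≤ t := by nlinarith
      have htmr : t ≤ m - r := by nlinarith
      have hcastT : (t.toNat : Int) = t := Int.toNat_of_nonneg (by omega)
      have hrun2 := dejnumerLoop2_run t.toNat (m - r).toNat r m (k + 1) (by omega) (by omega)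
        (by rw [hcastT]; nlinarith) (by rw [hcastT]; nlinarith)
      rw [hcastT] at hrun2
      simp only [if_neg hne, if_pos hlt]
      have hadd : r - m + m = r := by ring
      simp only [zero_add]
      rw [hadd, hrun2]
      simp only [dejnumer_alt, if_neg (not_le.mpr hpos), ← hk, ← hr, if_neg hrz, ← hT]
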